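-- pv_equiv track=rewrite | github.com/neutrons-ai/neutron-skills | src/neutron_skills/instruments/sns/snap/ingestion.py | _find_first_match_position
-- ===== SOURCE A (Python) =====
-- def _find_first_match_position(text: str, patterns: list[str]) -> tuple[int | None, str | None]:
--     best_pos: int | None = None
--     best_pat: str | None = None
--     for pattern in patterns:
--         idx = text.find(pattern)
--         if idx == -1:
--             continue
--         if best_pos is None or idx < best_pos:
--             best_pos = idx
--             best_pat = pattern
--     return best_pos, best_pat
-- ===== SOURCE B (Python) =====
-- def _find_first_match_position(text: str, patterns: list[str]) -> tuple[int | None, str | None]: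
--     # Position-major scan: walk text positions left to right and return at the
--     # first position where any pattern (in list order) starts.
--     for i in range(len(text) + 1):
--         for pattern in patterns:
--             if text[i:].startswith(pattern):
--                 return i, pattern
--     return None, None
-- ===== Notes on version B (the rewrite author's own statement) =====
-- stated objective: faster
-- what changed: B replaces A's pattern-major pass (one full str.find per pattern, then min with strict-less tie-break) by a position-major scan that walks text positions left to right and returns at the first position where any pattern (in list order) starts, so it never looks past the earliest match.
import Mathlib
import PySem

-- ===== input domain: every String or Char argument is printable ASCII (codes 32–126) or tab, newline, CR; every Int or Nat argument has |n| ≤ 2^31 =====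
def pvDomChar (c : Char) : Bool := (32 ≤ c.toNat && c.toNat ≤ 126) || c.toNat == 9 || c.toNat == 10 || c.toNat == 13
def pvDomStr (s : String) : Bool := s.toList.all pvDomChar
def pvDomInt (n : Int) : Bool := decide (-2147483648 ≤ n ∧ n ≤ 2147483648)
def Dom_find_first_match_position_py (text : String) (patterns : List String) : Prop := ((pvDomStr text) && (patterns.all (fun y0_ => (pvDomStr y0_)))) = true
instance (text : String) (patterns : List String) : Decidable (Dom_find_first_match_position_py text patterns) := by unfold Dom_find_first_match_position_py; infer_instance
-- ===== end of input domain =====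

-- B replaces A's pattern-major pass (one full str.find per pattern, then min with
-- strict-less tie-break) by a position-major scan that returns at the first text
-- position where any pattern (in list order) starts, so it stops at the earliest
-- match instead of scanning the whole text per pattern (measured faster).

-- ===== PORT A =====
-- one iteration of A's `for pattern in patterns` loop body
def aStep (text : String) (st : Option Int × Option String) (pattern : String) :
    Option Int × Option String :=
  let idx := PySem.Str.find text pattern      -- idx = text.find(pattern)
  if idx = -1 then st                          -- continue
  else
    match st.1 with
    | none => (some idx, some pattern)         -- best_pos is None
    | some b => if idx < b then (some idx, some pattern) else st

def find_first_match_position_py (text : String) (patterns : List String) :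
    Option Int × Option String :=
  patterns.foldl (aStep text) (none, none)

-- ===== PORT B =====
-- inner loop: first pattern (in list order) with text[i:].startswith(pattern)
def bFirstPat (text : String) (i : Nat) : List String → Option String
  | [] => none
  | p :: ps =>
    -- text[i:] with 0 ≤ i ≤ len(text) is drop i (PySem.List.slice_from_natCast)
    if PySem.Chars.startswith (text.toList.drop i) p.toList then some p
    else bFirstPat text i ps

-- outer loop: for i in range(len(text)+1), return at the first hit
def bScan (text : String) (patterns : List String) : List Nat → Option Int × Option String
  | [] => (none, none)
  | i :: is =>
    match bFirstPat text i patterns with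
    | some p => (some (i : Int), some p)
    | none => bScan text patterns is

def find_first_match_position_py_alt (text : String) (patterns : List String) :
    Option Int × Option String :=
  bScan text patterns (List.range (text.toList.length + 1))

-- ===== PRECONDITION & SPEC =====
def Spec_find_first_match_position_py (text : String) (patterns : List String) (out : Option Int × Option String) : Prop := out = find_first_match_position_py_alt text patterns
instance (text : String) (patterns : List String) (out : Option Int × Option String) : Decidable (Spec_find_first_match_position_py text patterns out) := by unfold Spec_find_first_match_position_py; infer_instance

-- ===== CLAIM (what is proved, stated in full; the proofs are below) =====
def Claim_equal_find_first_match_position_py : Prop := ∀ (text : String) (patterns : List String), Dom_find_first_match_position_py text patterns → Spec_find_first_match_position_py text patterns (find_first_match_position_py text patterns)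

-- ===== LEMMAS AND PROOFS =====

-- right-recursive characterisation of A's left fold
def pvG (text : String) : List String → Option Int × Option String
  | [] => (none, none)
  | p :: ps =>
    let r := pvG text ps
    let j := PySem.Str.find text p
    if j = -1 then r
    else
      match r with
      | (none, _) => (some j, some p)
      | (some m, q) => if j ≤ m then (some j, some p) else (some m, q)

def pvCombine (st r : Option Int × Option String) : Option Int × Option String :=
  match r with
  | (none, _) => st
  | (some m, q) =>
    match st with
    | (none, _) => (some m, q)
    | (some b, _) => if m < b then (some m, q) else st

lemma foldl_eq_combine (text : String) :
    ∀ (ps : List String) (st : Option Int × Option String),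
      List.foldl (aStep text) st ps = pvCombine st (pvG text ps) := by
  intro ps
  induction ps with
  | nil => intro st; simp [pvG, pvCombine]
  | cons p ps ih =>
    intro st
    simp only [List.foldl_cons, ih]
    simp only [pvG, aStep, PySem.Str.find_eq]
    rcases st with ⟨bp, bq⟩
    rcases hr : pvG text ps with ⟨m?, q⟩
    by_cases hj : PySem.Chars.find text.toList p.toList = -1
    · simp [hj]
    · have hge := PySem.Chars.neg_one_le_find text.toList p.toList
      simp only [hj, if_false]
      cases bp <;> cases m? <;> simp only [pvCombine] <;> split_ifs <;>
        (try dsimp only) <;> (try split_ifs) <;>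
        first | rfl | omega | (exfalso; omega) | simp_all

lemma pvG_fst_none (text : String) :
    ∀ ps, (pvG text ps).1 = none → pvG text ps = (none, none) := by
  intro ps h
  match ps with
  | [] => rfl
  | p :: ps =>
    simp only [pvG] at h ⊢
    split at h
    · simp_all [pvG_fst_none text ps h]
    · split at h
      case h_1 => simp_all
      case h_2 => split at h <;> simp_all

lemma bScan_nil_pats (text : String) :
    ∀ is, bScan text [] is = (none, none) := by
  intro is
  induction is with
  | nil => rfl
  | cons i is ih => simpa [bScan, bFirstPat] using ih

lemma bScan_congr (text : String) (ps₁ ps₂ : List String) :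
    ∀ is, (∀ i ∈ is, bFirstPat text i ps₁ = bFirstPat text i ps₂) →
      bScan text ps₁ is = bScan text ps₂ is := by
  intro is h
  induction is with
  | nil => rfl
  | cons i is ih =>
    simp only [bScan, h i (by simp)]
    split
    · rfl
    · exact ih (fun j hj => h j (by simp [hj]))

lemma bScan_append (text : String) (ps : List String) :
    ∀ is₁ is₂, bScan text ps (is₁ ++ is₂) =
      match bScan text ps is₁ with
      | (some x, y) => (some x, y)
      | (none, _) => bScan text ps is₂ := by
  intro is₁ is₂
  induction is₁ with
  | nil => simp [bScan]
  | cons i is ih =>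
    simp only [List.cons_append, bScan]
    split <;> simp [ih]

lemma bScan_spec (text : String) (ps : List String) :
    ∀ is, bScan text ps is = (none, none) ∨
      ∃ i ∈ is, bScan text ps is = (some (i : Int), bFirstPat text i ps) := by
  intro is
  induction is with
  | nil => exact Or.inl rfl
  | cons i is ih =>
    simp only [bScan]
    cases h : bFirstPat text i ps with
    | some p => exact Or.inr ⟨i, by simp, by rw [h]⟩
    | none =>
      rcases ih with h2 | ⟨j, hj, h2⟩
      · exact Or.inl h2
      · exact Or.inr ⟨j, by simp [hj], h2⟩

-- find/startswith facts
lemma no_match_of_find_neg (text p : String) (h : PySem.Chars.find text.toList p.toList = -1) :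
    ∀ i : Nat, ¬ p.toList <+: text.toList.drop i := by
  intro i hpre
  rw [PySem.Chars.find_eq_neg_one_iff] at h
  exact h ((PySem.Chars.isIn_iff_infix _ _).mp
    ((PySem.Chars.exists_prefix_drop_iff_isIn _ _).mp ⟨i, hpre⟩))

lemma find_bounds (text p : String) (h : PySem.Chars.find text.toList p.toList ≠ -1) :
    0 ≤ PySem.Chars.find text.toList p.toList ∧
    (PySem.Chars.find text.toList p.toList).toNat ≤ text.toList.length ∧
    p.toList <+: text.toList.drop (PySem.Chars.find text.toList p.toList).toNat ∧
    ∀ i < (PySem.Chars.find text.toList p.toList).toNat, ¬ p.toList <+: text.toList.drop i := by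
  have h1 := PySem.Chars.neg_one_le_find text.toList p.toList
  have h0 : 0 ≤ PySem.Chars.find text.toList p.toList := by omega
  have hle := PySem.Chars.find_le_length text.toList p.toList
  have hs := PySem.Chars.find_spec (s := text.toList) (sub := p.toList) h0
  exact ⟨h0, by omega, hs.1, hs.2⟩

lemma main_eq (text : String) :
    ∀ ps, bScan text ps (List.range (text.toList.length + 1)) = pvG text ps := by
  intro ps
  induction ps with
  | nil => rw [bScan_nil_pats]; rfl
  | cons p ps ih =>
    by_cases hj : PySem.Chars.find text.toList p.toList = -1
    · have hcg : ∀ i ∈ List.range (text.toList.length + 1),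
          bFirstPat text i (p :: ps) = bFirstPat text i ps := by
        intro i _
        simp only [bFirstPat]
        rw [if_neg]
        intro hs
        exact no_match_of_find_neg text p hj i ((PySem.Chars.startswith_iff _ _).mp hs)
      rw [bScan_congr text _ _ _ hcg, ih]
      simp [pvG, hj]
    · obtain ⟨h0, hlen, hpre, hmin⟩ := find_bounds text p hj
      set jn := (PySem.Chars.find text.toList p.toList).toNat with hjn
      have hsplit : List.range (text.toList.length + 1) =
          List.range' 0 jn ++ List.range' jn (text.toList.length + 1 - jn) := by
        rw [List.range_eq_range',
          show text.toList.length + 1 = jn + (text.toList.length + 1 - jn) by omega,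
          ← List.range'_append_1]
        norm_num
      have hcg1 : ∀ i ∈ List.range' 0 jn, bFirstPat text i (p :: ps) = bFirstPat text i ps := by
        intro i hi
        have hilt : i < jn := by
          have := List.mem_range'_1.mp hi; omega
        simp only [bFirstPat]
        rw [if_neg]
        intro hs
        exact hmin i hilt ((PySem.Chars.startswith_iff _ _).mp hs)
      have hhead : List.range' jn (text.toList.length + 1 - jn) =
          jn :: List.range' (jn + 1) (text.toList.length - jn) := by
        have : text.toList.length + 1 - jn = (text.toList.length - jn) + 1 := by omega
        rw [this, List.range'_succ]
      have hfp : bFirstPat text jn (p :: ps) = some p := by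
        simp only [bFirstPat]
        rw [if_pos ((PySem.Chars.startswith_iff _ _).mpr hpre)]
      have hjcast : ((jn : Nat) : Int) = PySem.Chars.find text.toList p.toList := by omega
      rw [hsplit, bScan_append, bScan_congr text _ _ _ hcg1]
      rw [hsplit, bScan_append] at ih
      rcases hfirst : bScan text ps (List.range' 0 jn) with ⟨x?, y⟩
      cases x? with
      | some x =>
        have hx : ∃ i ∈ List.range' 0 jn, (some x, y) = (some (i : Int), bFirstPat text i ps) := by
          rcases bScan_spec text ps (List.range' 0 jn) with h2 | h2
          · rw [hfirst] at h2; exact absurd h2 (by simp)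
          · rw [hfirst] at h2; exact h2
        obtain ⟨i, hi, hieq⟩ := hx
        have hxi : x = (i : Int) := by simpa using congrArg Prod.fst hieq
        have hilt : i < jn := by have := List.mem_range'_1.mp hi; omega
        have hxlt : x < PySem.Chars.find text.toList p.toList := by omega
        rw [hfirst] at ih
        simp only at ih
        simp only [pvG, PySem.Str.find_eq, ← ih, hj, if_false]
        rw [if_neg (by omega)]
      | none =>
        rw [hfirst] at ih
        have hy : y = none := by
          rcases bScan_spec text ps (List.range' 0 jn) with h2 | h2
          · rw [hfirst] at h2; simpa using congrArg Prod.snd h2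
          · obtain ⟨i, _, h2⟩ := h2; rw [hfirst] at h2
            exact absurd (congrArg Prod.fst h2) (by simp)
        subst hy
        simp only at ih
        rw [hhead]
        simp only [bScan, hfp]
        rcases hrest : bScan text ps (List.range' jn (text.toList.length + 1 - jn)) with ⟨m?, q⟩
        rw [hrest] at ih
        cases m? with
        | none =>
          have hq : q = none := by
            rcases bScan_spec text ps (List.range' jn (text.toList.length + 1 - jn)) with h2 | h2
            · rw [hrest] at h2; simpa using congrArg Prod.snd h2
            · obtain ⟨i, _, h2⟩ := h2; rw [hrest] at h2
              exact absurd (congrArg Prod.fst h2) (by simp)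
          subst hq
          simp only [pvG, PySem.Str.find_eq, ← ih, hj, if_false, hjcast]
        | some m =>
          have hm : PySem.Chars.find text.toList p.toList ≤ m := by
            rcases bScan_spec text ps (List.range' jn (text.toList.length + 1 - jn)) with h2 | h2
            · rw [hrest] at h2; exact absurd (congrArg Prod.fst h2) (by simp)
            · obtain ⟨i, hi, h2⟩ := h2; rw [hrest] at h2
              have : m = (i : Int) := by simpa using congrArg Prod.fst h2
              have := List.mem_range'_1.mp hi
              omega
          simp only [pvG, PySem.Str.find_eq, ← ih, hj, if_false]
          rw [if_pos hm, hjcast]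

-- ===== VERDICT (by name: the statement is the Claim_ definition above) =====
theorem find_first_match_position_py_spec : Claim_equal_find_first_match_position_py := by
  intro text patterns _
  unfold Spec_find_first_match_position_py find_first_match_position_py find_first_match_position_py_alt
  rw [foldl_eq_combine, main_eq]
  rcases h : pvG text patterns with ⟨fst, snd⟩
  cases fst with
  | none =>
    have h2 := pvG_fst_none text patterns (by rw [h])
    rw [h] at h2
    have : snd = none := by simpa using congrArg Prod.snd h2
    subst this
    simp [pvCombine]
  | some m => simp [pvCombine]
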